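-- pv_equiv track=rewrite | github.com/johnnylugm-tech/Agent-Quality-Guard | src/scorer.py | calculate_dimension_score
-- ===== SOURCE A (Python) =====
-- from typing import Dict, Any, List
--
-- SEVERITY_PENALTIES = {
--     "high": 15,
--     "medium": 8,
--     "low": 3
-- }
--
-- DIMENSION_START_SCORE = 100
--
-- def calculate_dimension_score(issues: List[Dict[str, Any]], dimension: str) -> float:
--     """
--     Calculate score for a specific dimension
--     Returns score from 0-100
--     """
--     # Start with perfect score
--     score = DIMENSION_START_SCORE
--
--     # Filter issues for this dimension
--     dimension_issues = [i for i in issues if i.get("type") == dimension]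
--
--     # Apply penalties based on severity
--     for issue in dimension_issues:
--         severity = issue.get("severity", "low")
--         penalty = SEVERITY_PENALTIES.get(severity, SEVERITY_PENALTIES["low"])
--         score -= penalty
--
--     # Ensure score doesn't go below 0
--     return max(0, score)
-- ===== SOURCE B (Python) =====
-- SEVERITY_PENALTIES = {
--     "high": 15,
--     "medium": 8,
--     "low": 3
-- }
--
-- DIMENSION_START_SCORE = 100
--
-- def calculate_dimension_score(issues, dimension):
--     # Phase 1: tally severities of the issues in this dimension
--     counts = {}
--     for i in issues:
--         if i.get("type") == dimension:
--             s = i.get("severity", "low")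
--             counts[s] = counts.get(s, 0) + 1
--     # Phase 2: weighted sum over the distinct severities
--     total = 0
--     for s, c in counts.items():
--         total += c * SEVERITY_PENALTIES.get(s, SEVERITY_PENALTIES["low"])
--     return max(0, DIMENSION_START_SCORE - total)
-- ===== Notes on version B (the rewrite author's own statement) =====
-- stated objective: alternative
-- what changed: B first aggregates a severity-count table in one pass over the issues, then computes the total penalty as a weighted sum over the distinct severities, instead of A's filter-then-subtract-per-issue loop.
import Mathlib
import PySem

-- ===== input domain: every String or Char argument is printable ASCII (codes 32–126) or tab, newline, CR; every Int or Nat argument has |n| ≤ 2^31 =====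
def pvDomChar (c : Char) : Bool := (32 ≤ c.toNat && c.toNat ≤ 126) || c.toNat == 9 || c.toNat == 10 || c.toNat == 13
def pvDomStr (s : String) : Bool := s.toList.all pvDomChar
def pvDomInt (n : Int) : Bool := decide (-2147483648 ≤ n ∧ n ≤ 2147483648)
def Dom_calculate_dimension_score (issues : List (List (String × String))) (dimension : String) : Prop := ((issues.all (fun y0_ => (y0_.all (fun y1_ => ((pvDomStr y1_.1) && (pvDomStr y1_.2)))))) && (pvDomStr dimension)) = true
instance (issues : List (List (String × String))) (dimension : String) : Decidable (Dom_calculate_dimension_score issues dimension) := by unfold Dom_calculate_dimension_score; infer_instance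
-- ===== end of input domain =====

-- B aggregates a severity-count table first and then takes a weighted sum over the
-- distinct severities, instead of A's filter-then-subtract-one-penalty-per-issue loop.

-- ===== PORT A =====
def SEVERITY_PENALTIES : PySem.Dict String Int :=
  PySem.Dict.ofList [("high", 15), ("medium", 8), ("low", 3)]

def DIMENSION_START_SCORE : Int := 100

def calculate_dimension_score (issues : List (List (String × String))) (dimension : String) : Int :=
  let score : Int := DIMENSION_START_SCORE
  let dimension_issues := issues.filter (fun i => (PySem.Dict.ofList i).get? "type" == some dimension)
  let score := dimension_issues.foldl (fun score issue =>
      let severity := (PySem.Dict.ofList issue).getD "severity" "low"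
      let penalty := SEVERITY_PENALTIES.getD severity (SEVERITY_PENALTIES.getD "low" 0)
      score - penalty) score
  max 0 score

-- ===== PORT B =====
def calculate_dimension_score_alt (issues : List (List (String × String))) (dimension : String) : Int :=
  let counts : PySem.Dict String Int := issues.foldl (fun d i =>
      let di := PySem.Dict.ofList i
      if di.get? "type" == some dimension then
        let s := di.getD "severity" "low"
        d.insert s (d.getD s 0 + 1)
      else d) PySem.Dict.empty
  let total := counts.items.foldl (fun total p =>
      total + p.2 * SEVERITY_PENALTIES.getD p.1 (SEVERITY_PENALTIES.getD "low" 0)) 0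
  max 0 (DIMENSION_START_SCORE - total)

-- ===== PRECONDITION & SPEC =====
def Spec_calculate_dimension_score (issues : List (List (String × String))) (dimension : String) (out : Int) : Prop := out = calculate_dimension_score_alt issues dimension
instance (issues : List (List (String × String))) (dimension : String) (out : Int) : Decidable (Spec_calculate_dimension_score issues dimension out) := by unfold Spec_calculate_dimension_score; infer_instance

-- ===== CLAIM (what is proved, stated in full; the proofs are below) =====
def Claim_equal_calculate_dimension_score : Prop := ∀ (issues : List (List (String × String))) (dimension : String), Dom_calculate_dimension_score issues dimension → Spec_calculate_dimension_score issues dimension (calculate_dimension_score issues dimension)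

-- ===== LEMMAS AND PROOFS =====

-- B's single pass over the issues equals folding the count-table step over the filtered-and-keyed list.
theorem fold_counts_eq {alpha : Type} (cond : alpha → Bool) (key : alpha → String)
    (l : List alpha) (d0 : PySem.Dict String Int) :
    l.foldl (fun d i => if cond i then d.insert (key i) (d.getD (key i) 0 + 1) else d) d0
      = ((l.filter cond).map key).foldl (fun d s => d.insert s (d.getD s 0 + 1)) d0 := by
  induction l generalizing d0 with
  | nil => rfl
  | cons a l ih =>
    by_cases h : cond a <;> simp [h, ih]

-- A's subtracting fold is the start score minus the sum of the mapped penalties.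
theorem foldl_sub_eq_sub_sum {alpha : Type} (g : alpha → Int) (l : List alpha) (init : Int) :
    l.foldl (fun s x => s - g x) init = init - (l.map g).sum := by
  induction l generalizing init with
  | nil => simp
  | cons a l ih => simp [ih]; omega

theorem sum_map_ite_self {beta : Type} [DecidableEq beta] (ks : List beta) (a : beta) (f : beta → Int)
    (hnd : ks.Nodup) (ha : a ∈ ks) :
    (ks.map (fun k => if k = a then f k else 0)).sum = f a := by
  induction ks with
  | nil => simp at ha
  | cons b ks ih =>
    rw [List.nodup_cons] at hnd
    rw [List.map_cons, List.sum_cons]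
    by_cases h : b = a
    · subst h
      have hz : (ks.map (fun k => if k = b then f k else 0)).sum = 0 := by
        apply List.sum_eq_zero
        intro x hx
        obtain ⟨k, hk, rfl⟩ := List.mem_map.mp hx
        have hkb : ¬ k = b := fun e => hnd.1 (e ▸ hk)
        simp [hkb]
      simp [hz]
    · have ha' : a ∈ ks := by
        rcases List.mem_cons.mp ha with h' | h'
        · exact absurd h'.symm h
        · exact h'
      simp [h, ih hnd.2 ha']

-- the weighted sum of counts over any nodup superset of the elements is the plain sum
theorem sum_count_mul {beta : Type} [DecidableEq beta] (f : beta → Int) (l ks : List beta)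
    (hnd : ks.Nodup) (hsub : ∀ x ∈ l, x ∈ ks) :
    (ks.map (fun k => (l.count k : Int) * f k)).sum = (l.map f).sum := by
  induction l with
  | nil => simp
  | cons a l ih =>
    have ha : a ∈ ks := hsub a (List.mem_cons_self ..)
    have step : ∀ k : beta, ((a :: l).count k : Int) * f k
        = (l.count k : Int) * f k + (if k = a then f k else 0) := by
      intro k
      by_cases h : k = a
      · subst h; simp; ring
      · have h2 : ¬ a = k := fun e => h e.symm
        simp [h, h2]
    calc (ks.map (fun k => ((a :: l).count k : Int) * f k)).sum
        = (ks.map (fun k => (l.count k : Int) * f k + (if k = a then f k else 0))).sum := by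
          simp only [step]
      _ = (ks.map (fun k => (l.count k : Int) * f k)).sum
            + (ks.map (fun k => if k = a then f k else 0)).sum := by
          rw [← List.sum_map_add]
      _ = (l.map f).sum + f a := by
          rw [ih (fun x hx => hsub x (List.mem_cons_of_mem _ hx)),
              sum_map_ite_self ks a f hnd ha]
      _ = ((a :: l).map f).sum := by simp; ring

theorem calculate_dimension_score_eq (issues : List (List (String × String))) (dimension : String) :
    calculate_dimension_score issues dimension = calculate_dimension_score_alt issues dimension := by
  simp only [calculate_dimension_score, calculate_dimension_score_alt]
  rw [fold_counts_eq (fun i => (PySem.Dict.ofList i).get? "type" == some dimension)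
        (fun i => (PySem.Dict.ofList i).getD "severity" "low") issues PySem.Dict.empty,
      PySem.Dict.foldl_insert_getD_add_one_eq_counter, PySem.Dict.items_counter,
      List.foldl_map, PySem.List.foldl_add, foldl_sub_eq_sub_sum]
  congr 2
  rw [show ((issues.filter (fun i => (PySem.Dict.ofList i).get? "type" == some dimension)).map
        (fun issue => SEVERITY_PENALTIES.getD ((PySem.Dict.ofList issue).getD "severity" "low")
          (SEVERITY_PENALTIES.getD "low" 0)))
      = (((issues.filter (fun i => (PySem.Dict.ofList i).get? "type" == some dimension)).map
          (fun i => (PySem.Dict.ofList i).getD "severity" "low")).map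
        (fun s => SEVERITY_PENALTIES.getD s (SEVERITY_PENALTIES.getD "low" 0))) from by
      simp [List.map_map, Function.comp]]
  rw [← sum_count_mul (fun s => SEVERITY_PENALTIES.getD s (SEVERITY_PENALTIES.getD "low" 0))
        ((issues.filter (fun i => (PySem.Dict.ofList i).get? "type" == some dimension)).map
          (fun i => (PySem.Dict.ofList i).getD "severity" "low"))
        (PySem.Set.ofList _) (PySem.Set.nodup_ofList _)
        (fun x hx => (PySem.Set.mem_ofList _ x).mpr hx)]
  simp

-- ===== VERDICT (by name: the statement is the Claim_ definition above) =====
theorem calculate_dimension_score_spec : Claim_equal_calculate_dimension_score := by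
  intro issues dimension _
  unfold Spec_calculate_dimension_score
  exact calculate_dimension_score_eq issues dimension
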